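-- pv_equiv track=rewrite | github.com/miliar/Code_Jam_Webscraper | solutions_python/Problem_201/2014.py | getBestIndex
-- ===== SOURCE A (Python) =====
-- from math import ceil
--
-- def getBestIndex(stalls, first=False):
--     if(first):
--         nbOfStalls = len(stalls)
--         return ceil(nbOfStalls/2) - 1
--     else:
--         RsMax = 0
--         LsMax = 0
--         idxMax = -1
--         firstEqual = False
--
--         for i in range(1, len(stalls)-1):
--             if stalls[i] == False :
--                 Rs = computeRs(stalls, i)
--                 Ls = computeLs(stalls, i)
--                 if(min(Rs, Ls) > min(RsMax, LsMax)
--                    or ( min(Rs, Ls) == min(RsMax, LsMax) and max(Rs, Ls) > max(RsMax, LsMax) )):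
--                     RsMax=Rs
--                     LsMax=Ls
--                     idxMax=i
-- #                 elif(firstEqual==False and min(Rs, Ls) == min(RsMax, LsMax)):
-- #                     firstEqual = True
-- #                     RsMax=Rs
-- #                     LsMax=Ls
-- #                     idxMax=i
--
--         return idxMax
--
-- def computeLs(stalls, idx):
--     Ls = 0
--     idx -= 1
--     while(idx>0 and stalls[idx]==False):
--         Ls += 1
--         idx -= 1
--     return Ls
--
-- def computeRs(stalls, idx):
--     Rs = 0
--     idx += 1
--     while(idx<len(stalls)-1 and stalls[idx]==False):
--         Rs += 1
--         idx += 1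
--     return Rs
-- ===== SOURCE B (Python) =====
-- def getBestIndex(stalls, first=False):
--     # O(n): one right-to-left pass precomputes right-run lengths, then a single
--     # left-to-right selection pass carries the left-run length as a counter.
--     n = len(stalls)
--     if first:
--         return (n + 1) // 2 - 1
--     rs = [0] * n
--     run = 0
--     for i in range(n - 2, 0, -1):
--         rs[i] = run
--         run = run + 1 if not stalls[i] else 0
--     best = (0, 0)
--     idx = -1
--     ls = 0
--     for i in range(1, n - 1):
--         if stalls[i]:
--             ls = 0
--         else:
--             cand = (min(ls, rs[i]), max(ls, rs[i]))
--             if cand > best: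
--                 best = cand
--                 idx = i
--             ls += 1
--     return idx
-- ===== Notes on version B (the rewrite author's own statement) =====
-- stated objective: alternative
-- what changed: A recomputes the left/right free-run length from scratch at every free stall (nested scans, quadratic on long free runs); B precomputes right-run lengths in one right-to-left pass and carries the left-run length as a running counter in a single selection pass (worst-case O(n); not measurably faster on the random timing family, where free runs are short).
import Mathlib
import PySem

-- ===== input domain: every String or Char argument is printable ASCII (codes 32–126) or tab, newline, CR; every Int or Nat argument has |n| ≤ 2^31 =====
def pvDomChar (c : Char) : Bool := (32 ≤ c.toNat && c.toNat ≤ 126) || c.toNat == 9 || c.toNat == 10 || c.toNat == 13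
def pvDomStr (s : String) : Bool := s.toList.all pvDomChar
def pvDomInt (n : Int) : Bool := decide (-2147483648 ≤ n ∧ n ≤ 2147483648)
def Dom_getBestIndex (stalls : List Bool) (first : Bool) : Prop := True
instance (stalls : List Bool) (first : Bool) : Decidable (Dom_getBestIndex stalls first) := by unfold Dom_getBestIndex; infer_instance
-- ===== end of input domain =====

-- B replaces A's per-stall rescans by a two-pass run-length computation (alternative algorithm, single scan per direction).

-- ===== PORT A =====
-- while(idx>0 and stalls[idx]==False): Ls += 1; idx -= 1   (index is always in range when reached, so pyGetD's default is never used)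
def computeLsGo (stalls : List Bool) (idx : Int) (ls : Int) : Int :=
  if h : 0 < idx ∧ PySem.List.pyGetD stalls idx true = false then
    computeLsGo stalls (idx - 1) (ls + 1)
  else ls
termination_by idx.toNat
decreasing_by omega

def computeLs (stalls : List Bool) (idx : Int) : Int :=
  computeLsGo stalls (idx - 1) 0

-- while(idx<len(stalls)-1 and stalls[idx]==False): Rs += 1; idx += 1
def computeRsGo (stalls : List Bool) (idx : Int) (rs : Int) : Int :=
  if h : idx < (stalls.length : Int) - 1 ∧ PySem.List.pyGetD stalls idx true = false then
    computeRsGo stalls (idx + 1) (rs + 1)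
  else rs
termination_by ((stalls.length : Int) - idx).toNat
decreasing_by omega

def computeRs (stalls : List Bool) (idx : Int) : Int :=
  computeRsGo stalls (idx + 1) 0

-- ceil(n/2) on a float is exact for a list length; ceil(n/2) = (n+1)//2
-- loop body of A's selection loop (firstEqual in A is assigned and never read; omitted)
def selStepA (stalls : List Bool) (st : Int × Int × Int) (i : Int) : Int × Int × Int :=
  if PySem.List.pyGetD stalls i true = false then
    let Rs := computeRs stalls i
    let Ls := computeLs stalls i
    if min Rs Ls > min st.1 st.2.1 ∨
       (min Rs Ls = min st.1 st.2.1 ∧ max Rs Ls > max st.1 st.2.1) then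
      (Rs, Ls, i)
    else st
  else st

def getBestIndex (stalls : List Bool) (first : Bool) : Int :=
  if first then
    PySem.Int.floordiv ((stalls.length : Int) + 1) 2 - 1
  else
    ((PySem.List.pyRange 1 ((stalls.length : Int) - 1) 1).foldl
      (selStepA stalls) (0, 0, -1)).2.2

-- ===== PORT B =====
-- body of B's right-to-left pass: rs[i] = run; run = run + 1 if not stalls[i] else 0
def rsStep (stalls : List Bool) (st : List Int × Int) (i : Int) : List Int × Int :=
  (PySem.List.pySetD st.1 i st.2,
   if PySem.List.pyGetD stalls i true = false then st.2 + 1 else 0)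

-- body of B's selection pass; state = (best pair, idx, running ls)
def selStepB (stalls : List Bool) (rs : List Int) (st : (Int × Int) × Int × Int) (i : Int) :
    (Int × Int) × Int × Int :=
  if PySem.List.pyGetD stalls i true = true then
    (st.1, st.2.1, 0)
  else
    let c1 := min st.2.2 (PySem.List.pyGetD rs i 0)
    let c2 := max st.2.2 (PySem.List.pyGetD rs i 0)
    if c1 > st.1.1 ∨ (c1 = st.1.1 ∧ c2 > st.1.2) then
      ((c1, c2), i, st.2.2 + 1)
    else
      (st.1, st.2.1, st.2.2 + 1)

def getBestIndex_alt (stalls : List Bool) (first : Bool) : Int :=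
  let n : Int := stalls.length
  if first then
    PySem.Int.floordiv (n + 1) 2 - 1
  else
    let rs := ((PySem.List.pyRange (n - 2) 0 (-1)).foldl (rsStep stalls)
      (List.replicate stalls.length 0, 0)).1
    (((PySem.List.pyRange 1 (n - 1) 1).foldl (selStepB stalls rs)
      ((0, 0), -1, 0)).2.1 : Int)

-- ===== PRECONDITION & SPEC =====
def Spec_getBestIndex (stalls : List Bool) (first : Bool) (out : Int) : Prop := out = getBestIndex_alt stalls first
instance (stalls : List Bool) (first : Bool) (out : Int) : Decidable (Spec_getBestIndex stalls first out) := by unfold Spec_getBestIndex; infer_instance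

-- ===== CLAIM (what is proved, stated in full; the proofs are below) =====
def Claim_equal_getBestIndex : Prop := ∀ (stalls : List Bool) (first : Bool), Dom_getBestIndex stalls first → Spec_getBestIndex stalls first (getBestIndex stalls first)

-- ===== LEMMAS AND PROOFS =====

theorem computeLsGo_shift_aux (stalls : List Bool) (n : Nat) :
    ∀ idx : Int, idx.toNat ≤ n → ∀ ls : Int,
      computeLsGo stalls idx ls = ls + computeLsGo stalls idx 0 := by
  induction n with
  | zero =>
    intro idx h ls
    have hc : ¬(0 < idx ∧ PySem.List.pyGetD stalls idx true = false) :=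
      fun hc => absurd hc.1 (by omega)
    rw [computeLsGo, dif_neg hc, computeLsGo, dif_neg hc]
    simp
  | succ n ih =>
    intro idx h ls
    by_cases h1 : 0 < idx ∧ PySem.List.pyGetD stalls idx true = false
    · conv_lhs => rw [computeLsGo]
      conv_rhs => rw [computeLsGo]
      rw [dif_pos h1, dif_pos h1,
        ih (idx - 1) (by omega) (ls + 1), ih (idx - 1) (by omega) (0 + 1)]
      ring
    · rw [computeLsGo, dif_neg h1, computeLsGo, dif_neg h1]
      simp

theorem computeLsGo_shift (stalls : List Bool) (idx ls : Int) :
    computeLsGo stalls idx ls = ls + computeLsGo stalls idx 0 :=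
  computeLsGo_shift_aux stalls idx.toNat idx le_rfl ls

theorem computeRsGo_shift_aux (stalls : List Bool) (n : Nat) :
    ∀ idx : Int, ((stalls.length : Int) - idx).toNat ≤ n → ∀ rs : Int,
      computeRsGo stalls idx rs = rs + computeRsGo stalls idx 0 := by
  induction n with
  | zero =>
    intro idx h rs
    have hc : ¬(idx < (stalls.length : Int) - 1 ∧ PySem.List.pyGetD stalls idx true = false) :=
      fun hc => absurd hc.1 (by omega)
    rw [computeRsGo, dif_neg hc, computeRsGo, dif_neg hc]
    simp
  | succ n ih =>
    intro idx h rs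
    by_cases h1 : idx < (stalls.length : Int) - 1 ∧ PySem.List.pyGetD stalls idx true = false
    · conv_lhs => rw [computeRsGo]
      conv_rhs => rw [computeRsGo]
      rw [dif_pos h1, dif_pos h1,
        ih (idx + 1) (by omega) (rs + 1), ih (idx + 1) (by omega) (0 + 1)]
      ring
    · rw [computeRsGo, dif_neg h1, computeRsGo, dif_neg h1]
      simp

theorem computeRsGo_shift (stalls : List Bool) (idx rs : Int) :
    computeRsGo stalls idx rs = rs + computeRsGo stalls idx 0 :=
  computeRsGo_shift_aux stalls ((stalls.length : Int) - idx).toNat idx le_rfl rs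

theorem computeLs_succ (stalls : List Bool) (i : Int) :
    computeLs stalls (i + 1) =
      if 0 < i ∧ PySem.List.pyGetD stalls i true = false then computeLs stalls i + 1 else 0 := by
  unfold computeLs
  have : i + 1 - 1 = i := by ring
  rw [this, computeLsGo]
  split_ifs with h1
  · rw [computeLsGo_shift]; ring
  · rfl

theorem computeRs_pred (stalls : List Bool) (i : Int) :
    computeRs stalls (i - 1) =
      if i < (stalls.length : Int) - 1 ∧ PySem.List.pyGetD stalls i true = false
      then computeRs stalls i + 1 else 0 := by
  unfold computeRs
  have : i - 1 + 1 = i := by ring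
  rw [this, computeRsGo]
  split_ifs with h1
  · rw [computeRsGo_shift]; ring
  · rfl

theorem pyGetD_replicate (n : Nat) (m : Int) :
    PySem.List.pyGetD (List.replicate n (0 : Int)) m 0 = 0 := by
  rcases h : PySem.List.pyGet? (List.replicate n (0 : Int)) m with _ | x
  · simp [PySem.List.pyGetD, h]
  · have := PySem.List.mem_of_pyGet?_eq_some _ h
    simp at this
    simp [PySem.List.pyGetD, h, this.2]

theorem rsFold_inv_aux (stalls : List Bool) (d : Nat) :
    ∀ a : Int, 0 ≤ a → a ≤ (stalls.length : Int) - 2 → a.toNat ≤ d →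
    ∀ st : List Int × Int,
      st.1.length = stalls.length →
      st.2 = computeRs stalls a →
      (∀ m : Int, 0 ≤ m → PySem.List.pyGetD st.1 m 0 =
         if a < m ∧ m ≤ (stalls.length : Int) - 2 then computeRs stalls m else 0) →
      ∀ m : Int, 0 ≤ m →
        PySem.List.pyGetD ((PySem.List.pyRange a 0 (-1)).foldl (rsStep stalls) st).1 m 0 =
          if 0 < m ∧ m ≤ (stalls.length : Int) - 2 then computeRs stalls m else 0 := by
  induction d with
  | zero =>
    intro a h0 h2 hd st hlen hrun hget m hm
    have ha : a = 0 := by omega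
    subst ha
    rw [PySem.List.pyRange_neg_one_eq_nil le_rfl]
    exact hget m hm
  | succ d ih =>
    intro a h0 h2 hd st hlen hrun hget m hm
    by_cases hpos : 0 < a
    · rw [PySem.List.pyRange_neg_one_cons hpos, List.foldl_cons]
      refine ih (a - 1) (by omega) (by omega) (by omega) (rsStep stalls st a) ?_ ?_ ?_ m hm
      · show (PySem.List.pySetD st.1 a st.2).length = stalls.length
        rw [PySem.List.length_pySetD, hlen]
      · show (if PySem.List.pyGetD stalls a true = false then st.2 + 1 else 0)
            = computeRs stalls (a - 1)
        rw [computeRs_pred stalls a]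
        by_cases hf : PySem.List.pyGetD stalls a true = false
        · rw [if_pos hf, if_pos ⟨by omega, hf⟩, hrun]
        · rw [if_neg hf, if_neg (fun hc => hf hc.2)]
      · intro m' hm'
        show PySem.List.pyGetD (PySem.List.pySetD st.1 a st.2) m' 0 = _
        have hacast : ((a.toNat : Nat) : Int) = a := by omega
        have hmcast : ((m'.toNat : Nat) : Int) = m' := by omega
        have halen : a.toNat < st.1.length := by omega
        have key := PySem.List.pyGetD_pySetD_natCast st.1 a.toNat m'.toNat st.2 0 halen
        rw [hacast, hmcast] at key
        rw [key]
        by_cases hmeq : m' = a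
        · rw [if_pos (by omega), hrun, hmeq, if_pos ⟨by omega, by omega⟩]
        · rw [if_neg (by omega), hget m' hm']
          split_ifs with h1 h2 <;> first | rfl | (exfalso; omega)
    · have ha : a = 0 := by omega
      subst ha
      rw [PySem.List.pyRange_neg_one_eq_nil le_rfl]
      exact hget m hm

theorem sel_inv (stalls : List Bool) (rs : List Int)
    (hrs : ∀ m : Int, 1 ≤ m → m ≤ (stalls.length : Int) - 2 →
      PySem.List.pyGetD rs m 0 = computeRs stalls m) :
    ∀ (d : Nat) (k : Int), 1 ≤ k → ((stalls.length : Int) - 1 - k).toNat ≤ d →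
    ∀ (stA : Int × Int × Int) (stB : (Int × Int) × Int × Int),
      stB.1.1 = min stA.1 stA.2.1 → stB.1.2 = max stA.1 stA.2.1 →
      stB.2.1 = stA.2.2 → stB.2.2 = computeLs stalls k →
      ((PySem.List.pyRange k ((stalls.length : Int) - 1) 1).foldl (selStepB stalls rs) stB).2.1
        = ((PySem.List.pyRange k ((stalls.length : Int) - 1) 1).foldl (selStepA stalls) stA).2.2 := by
  intro d
  induction d with
  | zero =>
    intro k hk hd stA stB h1 h2 h3 h4
    rw [PySem.List.pyRange_one_eq_nil (by omega)]
    simpa using h3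
  | succ d ih =>
    intro k hk hd stA stB h1 h2 h3 h4
    by_cases hend : (stalls.length : Int) - 1 ≤ k
    · rw [PySem.List.pyRange_one_eq_nil hend]
      simpa using h3
    · have hrsk : PySem.List.pyGetD rs k 0 = computeRs stalls k := hrs k hk (by omega)
      rw [PySem.List.pyRange_one_cons (by omega), List.foldl_cons, List.foldl_cons]
      by_cases hf : PySem.List.pyGetD stalls k true = false
      · by_cases hcond : min (computeRs stalls k) (computeLs stalls k) > min stA.1 stA.2.1 ∨
            (min (computeRs stalls k) (computeLs stalls k) = min stA.1 stA.2.1 ∧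
             max (computeRs stalls k) (computeLs stalls k) > max stA.1 stA.2.1)
        · have eA : selStepA stalls stA k = (computeRs stalls k, computeLs stalls k, k) := by
            unfold selStepA
            rw [if_pos hf]
            dsimp only
            rw [if_pos hcond]
          have eB : selStepB stalls rs stB k =
              ((min (computeLs stalls k) (computeRs stalls k),
                max (computeLs stalls k) (computeRs stalls k)), k, stB.2.2 + 1) := by
            unfold selStepB
            rw [if_neg (by simp [hf]), hrsk, h4]
            dsimp only
            rw [if_pos (by
              rw [h1, h2, min_comm (computeLs stalls k) (computeRs stalls k),
                max_comm (computeLs stalls k) (computeRs stalls k)]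
              exact hcond)]
          refine ih (k + 1) (by omega) (by omega) _ _ ?_ ?_ ?_ ?_ <;> first | rw [eA, eB] | rw [eB]
          · exact min_comm _ _
          · exact max_comm _ _
          · show stB.2.2 + 1 = computeLs stalls (k + 1)
            rw [h4, computeLs_succ, if_pos ⟨by omega, hf⟩]
        · have eA : selStepA stalls stA k = stA := by
            unfold selStepA
            rw [if_pos hf]
            dsimp only
            rw [if_neg hcond]
          have eB : selStepB stalls rs stB k = (stB.1, stB.2.1, stB.2.2 + 1) := by
            unfold selStepB
            rw [if_neg (by simp [hf]), hrsk, h4]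
            dsimp only
            rw [if_neg (by
              rw [h1, h2, min_comm (computeLs stalls k) (computeRs stalls k),
                max_comm (computeLs stalls k) (computeRs stalls k)]
              exact hcond)]
          refine ih (k + 1) (by omega) (by omega) _ _ ?_ ?_ ?_ ?_ <;> first | rw [eA, eB] | rw [eB]
          · exact h1
          · exact h2
          · exact h3
          · show stB.2.2 + 1 = computeLs stalls (k + 1)
            rw [h4, computeLs_succ, if_pos ⟨by omega, hf⟩]
      · have hft : PySem.List.pyGetD stalls k true = true := by
          cases h : PySem.List.pyGetD stalls k true
          · exact absurd h hf
          · rfl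
        have eA : selStepA stalls stA k = stA := by
          unfold selStepA
          rw [if_neg hf]
        have eB : selStepB stalls rs stB k = (stB.1, stB.2.1, 0) := by
          unfold selStepB
          rw [if_pos hft]
        refine ih (k + 1) (by omega) (by omega) _ _ ?_ ?_ ?_ ?_ <;> first | rw [eA, eB] | rw [eB]
        · exact h1
        · exact h2
        · exact h3
        · show (0 : Int) = computeLs stalls (k + 1)
          rw [computeLs_succ, if_neg (fun hc => hf hc.2)]

-- ===== VERDICT (by name: the statement is the Claim_ definition above) =====
theorem getBestIndex_spec : Claim_equal_getBestIndex := by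
  intro stalls first _
  show getBestIndex stalls first = getBestIndex_alt stalls first
  cases first
  · rw [getBestIndex, getBestIndex_alt]
    simp only [Bool.false_eq_true, if_false]
    by_cases hn : (stalls.length : Int) - 1 ≤ 1
    · rw [PySem.List.pyRange_one_eq_nil hn]
      rfl
    · have hrs : ∀ m : Int, 1 ≤ m → m ≤ (stalls.length : Int) - 2 →
          PySem.List.pyGetD (((PySem.List.pyRange ((stalls.length : Int) - 2) 0 (-1)).foldl
            (rsStep stalls) (List.replicate stalls.length 0, 0)).1) m 0 = computeRs stalls m := by
        intro m hm1 hm2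
        have h := rsFold_inv_aux stalls ((stalls.length : Int) - 2).toNat
          ((stalls.length : Int) - 2) (by omega) le_rfl le_rfl
          (List.replicate stalls.length 0, 0) (by simp)
          (by
            show (0 : Int) = computeRs stalls ((stalls.length : Int) - 2)
            rw [computeRs, computeRsGo,
              dif_neg (fun hc => absurd hc.1 (by omega))])
          (by
            intro m' _
            rw [pyGetD_replicate, if_neg (fun hc => absurd hc.1 (by omega))])
          m (by omega)
        rw [h, if_pos ⟨by omega, hm2⟩]
      have key := sel_inv stalls _ hrs ((stalls.length : Int) - 2).toNat 1 le_rfl (by omega)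
        (0, 0, -1) ((0, 0), -1, 0) (by simp) (by simp) rfl
        (by
          show (0 : Int) = computeLs stalls 1
          rw [computeLs, computeLsGo, dif_neg (fun hc => absurd hc.1 (by omega))])
      exact key.symm
  · rfl
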